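-- pv_equiv track=rewrite | github.com/rohitg15/matasano | cryptopals/src/set6/c47_new/crypto_math.py | get_cube_root
-- ===== SOURCE A (Python) =====
-- def get_cube_root(n):
--     """Finds the cube root of n using binary search."""
--     lo = 0
--     hi = n
--
--     while lo < hi:
--         mid = (lo + hi) // 2
--         if mid**3 < n:
--             lo = mid + 1
--         else:
--             hi = mid
--
--     return lo
-- ===== SOURCE B (Python) =====
-- def get_cube_root(n):
--     """Smallest integer k >= 0 with k**3 >= n, by counting up from 0."""
--     k = 0
--     while k**3 < n:
--         k += 1
--     return k
-- ===== Notes on version B (the rewrite author's own statement) =====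
-- stated objective: simpler
-- what changed: Replaces interval bisection on [0, n] with a direct upward scan for the least k whose cube is at least n, removing the lo/hi midpoint bookkeeping.
import Mathlib
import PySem

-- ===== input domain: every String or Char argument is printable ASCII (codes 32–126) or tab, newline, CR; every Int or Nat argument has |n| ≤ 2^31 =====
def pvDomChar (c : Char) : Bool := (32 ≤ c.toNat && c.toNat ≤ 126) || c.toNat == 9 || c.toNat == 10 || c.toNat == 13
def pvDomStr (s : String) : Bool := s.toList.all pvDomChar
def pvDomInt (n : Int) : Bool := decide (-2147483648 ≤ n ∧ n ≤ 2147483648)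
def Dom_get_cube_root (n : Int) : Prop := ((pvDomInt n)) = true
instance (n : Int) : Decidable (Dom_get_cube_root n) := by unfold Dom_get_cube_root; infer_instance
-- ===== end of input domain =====

-- B replaces A's binary search with a simple upward scan for the least k with k^3 >= n (simpler, not faster).


-- ===== PORT A =====
-- midpoint strictly below hi when lo < hi (used for termination)
theorem gcr_mid_lt (lo hi : Int) (h : lo < hi) :
    PySem.Int.floordiv (lo + hi) 2 < hi := by
  rw [PySem.Int.floordiv_lt_iff_lt_mul (by omega : (0:Int) < 2)]
  omega

def gcrLoop (n lo hi : Int) : Int :=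
  if h : lo < hi then
    if (PySem.Int.floordiv (lo + hi) 2) ^ 3 < n then
      gcrLoop n (PySem.Int.floordiv (lo + hi) 2 + 1) hi
    else
      gcrLoop n lo (PySem.Int.floordiv (lo + hi) 2)
  else lo
termination_by (hi - lo).toNat
decreasing_by
  all_goals
    have h2 := gcr_mid_lt lo hi h
    have h1 := (PySem.Int.floordiv_two_mid_bounds (lo := lo) (hi := hi) (h := by omega)).1
    omega

def get_cube_root (n : Int) : Int := gcrLoop n 0 n

-- ===== PORT B =====
-- k only grows while k^3 < n, so k stays below n; tracked as a Nat counter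
def gcrScan (n : Int) (k : Nat) : Int :=
  if (k : Int) ^ 3 < n then gcrScan n (k + 1) else (k : Int)
termination_by n.toNat - k
decreasing_by
  have hk : (k : Int) ≤ (k : Int) ^ 3 := by
    exact_mod_cast Nat.le_self_pow (by omega) k
  omega

def get_cube_root_alt (n : Int) : Int := gcrScan n 0

-- ===== PRECONDITION & SPEC =====
def Spec_get_cube_root (n : Int) (out : Int) : Prop := out = get_cube_root_alt n
instance (n : Int) (out : Int) : Decidable (Spec_get_cube_root n out) := by unfold Spec_get_cube_root; infer_instance

-- ===== CLAIM (what is proved, stated in full; the proofs are below) =====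
def Claim_equal_get_cube_root : Prop := ∀ (n : Int), Dom_get_cube_root n → Spec_get_cube_root n (get_cube_root n)

-- ===== LEMMAS AND PROOFS =====

theorem gcrScan_ge (n : Int) (k : Nat) : n ≤ (gcrScan n k) ^ 3 := by
  fun_induction gcrScan n k with
  | case1 k h ih => exact ih
  | case2 k h => omega

theorem gcrScan_lb (n : Int) (k : Nat) : (k : Int) ≤ gcrScan n k := by
  fun_induction gcrScan n k with
  | case1 k h ih => push_cast at ih ⊢; omega
  | case2 k h => omega

theorem gcrScan_min (n : Int) (k m : Nat) (hkm : k ≤ m) (hm : n ≤ (m : Int) ^ 3) :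
    gcrScan n k ≤ (m : Int) := by
  fun_induction gcrScan n k with
  | case1 k h ih =>
    have hne : k ≠ m := by rintro rfl; omega
    exact ih (by omega)
  | case2 k h => exact_mod_cast hkm

-- binary-search invariant: result is in [lo, hi], cubes to ≥ n, and everything below it cubes to < n
theorem gcrLoop_spec (n lo hi : Int) (h0 : 0 ≤ lo) (hle : lo ≤ hi) (hhi : n ≤ hi ^ 3)
    (hlo : ∀ j : Int, 0 ≤ j → j < lo → j ^ 3 < n) :
    0 ≤ gcrLoop n lo hi ∧ n ≤ (gcrLoop n lo hi) ^ 3 ∧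
      ∀ j : Int, 0 ≤ j → j < gcrLoop n lo hi → j ^ 3 < n := by
  fun_induction gcrLoop n lo hi with
  | case1 lo hi h hcube ih =>
    have hb := PySem.Int.floordiv_two_mid_bounds (lo := lo) (hi := hi) (h := by omega)
    refine ih (by omega) ?_ hhi ?_
    · have := gcr_mid_lt lo hi h; omega
    · intro j hj hjm
      have hjle : j ≤ PySem.Int.floordiv (lo + hi) 2 := by omega
      have hmono : j ^ 3 ≤ (PySem.Int.floordiv (lo + hi) 2) ^ 3 :=
        pow_le_pow_left₀ hj hjle 3
      omega
  | case2 lo hi h hcube ih =>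
    have hb := PySem.Int.floordiv_two_mid_bounds (lo := lo) (hi := hi) (h := by omega)
    exact ih h0 hb.1 (by omega) hlo
  | case3 lo hi h =>
    have heq : lo = hi := by omega
    subst heq
    exact ⟨h0, hhi, hlo⟩

theorem gcrLoop_eq_scan (n : Int) : gcrLoop n 0 n = gcrScan n 0 := by
  by_cases hn : n ≤ 0
  · rw [gcrLoop, gcrScan]
    rw [dif_neg (show ¬(0:Int) < n by omega),
        if_neg (show ¬((0:Nat):Int) ^ 3 < n by push_cast; omega)]
    simp
  · have hn1 : 1 ≤ n := by omega
    have hhi : n ≤ n ^ 3 := by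
      nlinarith [mul_nonneg (mul_nonneg (show (0:Int) ≤ n - 1 by omega)
        (show (0:Int) ≤ n by omega)) (show (0:Int) ≤ n by omega),
        mul_nonneg (show (0:Int) ≤ n - 1 by omega) (show (0:Int) ≤ n by omega)]
    obtain ⟨hr0, hrge, hrmin⟩ :=
      gcrLoop_spec n 0 n (by omega) (by omega) hhi (by intro j hj hjl; omega)
    set r := gcrLoop n 0 n with hr
    have hs_ge := gcrScan_ge n 0
    have hs_lb := gcrScan_lb n 0
    -- scan ≤ r
    have hle1 : gcrScan n 0 ≤ r := by
      have := gcrScan_min n 0 r.toNat (by omega) (by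
        have : ((r.toNat : Int)) = r := by omega
        rw [this]; exact hrge)
      have hcast : ((r.toNat : Int)) = r := by omega
      omega
    -- r ≤ scan
    have hle2 : r ≤ gcrScan n 0 := by
      by_contra hc
      have hlt : gcrScan n 0 < r := by omega
      have := hrmin (gcrScan n 0) (by omega) hlt
      omega
    omega

-- ===== VERDICT (by name: the statement is the Claim_ definition above) =====
theorem get_cube_root_spec : Claim_equal_get_cube_root := by
  intro n _
  show get_cube_root n = get_cube_root_alt n
  unfold get_cube_root get_cube_root_alt
  exact gcrLoop_eq_scan n
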